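-- pv_equiv track=rewrite | github.com/doliverjr/Teacher-Student-Analytics | gen_sets.py | search_teacher
-- ===== SOURCE A (Python) =====
-- def search_teacher(teachers, room):
--     TLast = ""
--     TFirst = ""
--
--     for teacher in teachers:
--         if teacher['Classroom'] == room:
--             TLast = teacher['TLastName']
--             TFirst = teacher['TFirstName']
--
--     return [TLast, TFirst]
-- ===== SOURCE B (Python) =====
-- def search_teacher(teachers, room):
--     for teacher in reversed(list(teachers)):
--         if teacher['Classroom'] == room:
--             return [teacher['TLastName'], teacher['TFirstName']]
--     return ['', '']
-- ===== Notes on version B (the rewrite author's own statement) =====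
-- stated objective: alternative
-- what changed: Backward scan with early return on the first match from the end, instead of a forward scan that overwrites accumulator variables on every match.
import Mathlib
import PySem

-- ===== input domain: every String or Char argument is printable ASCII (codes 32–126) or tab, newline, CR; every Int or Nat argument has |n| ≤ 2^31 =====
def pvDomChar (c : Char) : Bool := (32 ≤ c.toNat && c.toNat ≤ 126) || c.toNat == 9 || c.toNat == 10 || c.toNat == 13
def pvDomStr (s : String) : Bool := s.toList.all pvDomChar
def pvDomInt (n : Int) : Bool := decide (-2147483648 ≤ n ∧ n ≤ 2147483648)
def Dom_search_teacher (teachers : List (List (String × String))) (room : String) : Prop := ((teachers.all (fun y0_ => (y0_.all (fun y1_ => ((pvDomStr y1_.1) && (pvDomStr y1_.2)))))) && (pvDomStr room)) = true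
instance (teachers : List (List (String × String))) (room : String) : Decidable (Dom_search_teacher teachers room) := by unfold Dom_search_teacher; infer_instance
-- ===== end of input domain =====

-- B replaces A's forward overwriting scan by a backward scan with early return (same result, alternative decomposition).


-- dict key lookup (first match in the association list); inside Pre_ the key is present, so the "" default is never used
def tGet (t : List (String × String)) (k : String) : String := (t.lookup k).getD ""

-- ===== PORT A =====
-- forward fold carrying the (TLast, TFirst) accumulator, overwritten on each room match
def search_teacher (teachers : List (List (String × String))) (room : String) : List String :=
  let p := teachers.foldl
    (fun (acc : String × String) teacher =>
      if tGet teacher "Classroom" == room then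
        (tGet teacher "TLastName", tGet teacher "TFirstName")
      else acc)
    ("", "")
  [p.1, p.2]

-- ===== PORT B =====
-- scan the reversed list, return on the first match encountered
def searchBack (teachers : List (List (String × String))) (room : String) : List String :=
  match teachers with
  | [] => ["", ""]
  | teacher :: rest =>
    if tGet teacher "Classroom" == room then
      [tGet teacher "TLastName", tGet teacher "TFirstName"]
    else searchBack rest room

def search_teacher_alt (teachers : List (List (String × String))) (room : String) : List String :=
  searchBack teachers.reverse room

-- ===== PRECONDITION & SPEC =====
-- Pre_ excludes exactly the inputs on which Python A raises KeyError: a teacher dict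
-- without a 'Classroom' key, or a room-matching teacher without 'TLastName'/'TFirstName'.
def Pre_search_teacher (teachers : List (List (String × String))) (room : String) : Prop :=
  ∀ t ∈ teachers, (t.lookup "Classroom").isSome ∧
    (t.lookup "Classroom" = some room →
      (t.lookup "TLastName").isSome ∧ (t.lookup "TFirstName").isSome)
instance (teachers : List (List (String × String))) (room : String) : Decidable (Pre_search_teacher teachers room) := by unfold Pre_search_teacher; infer_instance

def pvWitness_search_teacher : (List (List (String × String))) × String :=
  ([[("Classroom", "101"), ("TLastName", "Doe"), ("TFirstName", "Jane")],
    [("Classroom", "202"), ("TLastName", "Roe"), ("TFirstName", "Rob")]], "101")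

def Spec_search_teacher (teachers : List (List (String × String))) (room : String) (out : List String) : Prop := out = search_teacher_alt teachers room
instance (teachers : List (List (String × String))) (room : String) (out : List String) : Decidable (Spec_search_teacher teachers room out) := by unfold Spec_search_teacher; infer_instance

-- ===== CLAIM (what is proved, stated in full; the proofs are below) =====
def Claim_equal_search_teacher : Prop := ∀ (teachers : List (List (String × String))) (room : String), Dom_search_teacher teachers room → Pre_search_teacher teachers room → Spec_search_teacher teachers room (search_teacher teachers room)

-- ===== LEMMAS AND PROOFS =====

-- backward scan with an explicit default for the no-match case
def searchBackD (teachers : List (List (String × String))) (room : String) (acc : String × String) : List String :=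
  match teachers with
  | [] => [acc.1, acc.2]
  | teacher :: rest =>
    if tGet teacher "Classroom" == room then
      [tGet teacher "TLastName", tGet teacher "TFirstName"]
    else searchBackD rest room acc

lemma searchBackD_append_singleton (l : List (List (String × String))) (t : List (String × String)) (room : String) (acc : String × String) :
    searchBackD (l ++ [t]) room acc =
      searchBackD l room (if tGet t "Classroom" == room then (tGet t "TLastName", tGet t "TFirstName") else acc) := by
  induction l with
  | nil => by_cases h : tGet t "Classroom" == room <;> simp [searchBackD, h]
  | cons x xs ih => by_cases h : tGet x "Classroom" == room <;> simp [searchBackD, h, ih]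

lemma foldl_eq_searchBackD (teachers : List (List (String × String))) (room : String) :
    ∀ acc : String × String,
      (let p := teachers.foldl
        (fun (acc : String × String) teacher =>
          if tGet teacher "Classroom" == room then
            (tGet teacher "TLastName", tGet teacher "TFirstName")
          else acc) acc
       [p.1, p.2]) = searchBackD teachers.reverse room acc := by
  induction teachers with
  | nil => intro acc; simp [searchBackD]
  | cons t rest ih =>
    intro acc
    simp only [List.foldl_cons, List.reverse_cons, searchBackD_append_singleton]
    exact ih _

lemma searchBack_eq_searchBackD (l : List (List (String × String))) (room : String) :
    searchBack l room = searchBackD l room ("", "") := by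
  induction l with
  | nil => simp [searchBack, searchBackD]
  | cons t rest ih => by_cases h : tGet t "Classroom" == room <;> simp [searchBack, searchBackD, h, ih]

-- ===== VERDICT (by name: the statement is the Claim_ definition above) =====
theorem search_teacher_spec : Claim_equal_search_teacher := by
  intro teachers room _ _
  unfold Spec_search_teacher search_teacher search_teacher_alt
  rw [searchBack_eq_searchBackD]
  exact foldl_eq_searchBackD teachers room ("", "")
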